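-- pv_equiv track=rewrite | github.com/Sz-Ltc/CICD-Test-v2 | ci/check_mr_logs.py | check_solution_section
-- ===== SOURCE A (Python) =====
-- def check_solution_section(commit_msg):
--     section_started = False
--     for line in commit_msg.split("\n"):
--         if line.startswith("Solution:"):
--             section_started = True
--             break
--
--     if not section_started:
--         return False, "Missing 'Solution:' section"
--
--     return True, ""
-- ===== SOURCE B (Python) =====
-- def check_solution_section(commit_msg):
--     found = commit_msg.startswith("Solution:") or "\nSolution:" in commit_msg
--     return (True, "") if found else (False, "Missing 'Solution:' section")
-- ===== Notes on version B (the rewrite author's own statement) =====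
-- stated objective: simpler
-- what changed: Replaces the split-into-lines loop with a sentinel flag by a single substring test: some line starts with the marker iff the whole string starts with it or it occurs right after a newline character.
import Mathlib
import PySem

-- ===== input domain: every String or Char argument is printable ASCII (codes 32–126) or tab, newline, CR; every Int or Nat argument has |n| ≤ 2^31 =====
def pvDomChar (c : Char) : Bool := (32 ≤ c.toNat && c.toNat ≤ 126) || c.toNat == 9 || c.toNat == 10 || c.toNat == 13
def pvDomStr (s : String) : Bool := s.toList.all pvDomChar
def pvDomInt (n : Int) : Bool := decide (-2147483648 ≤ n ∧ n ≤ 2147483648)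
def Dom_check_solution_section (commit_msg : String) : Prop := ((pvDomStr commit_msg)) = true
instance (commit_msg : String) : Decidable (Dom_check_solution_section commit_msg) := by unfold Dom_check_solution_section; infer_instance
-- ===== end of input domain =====

-- B replaces A's per-line loop with a single substring test (simpler); same return value everywhere.

-- ===== PORT A =====
-- the 'for line in …: if line.startswith("Solution:"): flag = True; break' loop
def checkALoop : List (List Char) → Bool
  | [] => false
  | line :: rest =>
      if PySem.Chars.startswith line "Solution:".toList then true else checkALoop rest

def check_solution_section (commit_msg : String) : Bool × String :=
  let section_started := checkALoop (PySem.Chars.splitOn commit_msg.toList ['\n'])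
  if !section_started then (false, "Missing 'Solution:' section")
  else (true, "")

-- ===== PORT B =====
def check_solution_section_alt (commit_msg : String) : Bool × String :=
  let found := PySem.Str.startswith commit_msg "Solution:" || PySem.Str.isIn "\nSolution:" commit_msg
  if found then (true, "") else (false, "Missing 'Solution:' section")

-- ===== PRECONDITION & SPEC =====
def Spec_check_solution_section (commit_msg : String) (out : Bool × String) : Prop := out = check_solution_section_alt commit_msg
instance (commit_msg : String) (out : Bool × String) : Decidable (Spec_check_solution_section commit_msg out) := by unfold Spec_check_solution_section; infer_instance

-- ===== CLAIM (what is proved, stated in full; the proofs are below) =====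
def Claim_equal_check_solution_section : Prop := ∀ (commit_msg : String), Dom_check_solution_section commit_msg → Spec_check_solution_section commit_msg (check_solution_section commit_msg)

-- ===== LEMMAS AND PROOFS =====

-- a simple structural model of cs.split("\n")
def simpleSplit : List Char → List (List Char)
  | [] => [[]]
  | c :: rest =>
      if c = '\n' then [] :: simpleSplit rest
      else
        match simpleSplit rest with
        | [] => [[c]]
        | p :: ps => (c :: p) :: ps

def consHead (pre : List Char) : List (List Char) → List (List Char)
  | [] => [pre]
  | p :: ps => (pre ++ p) :: ps

theorem simpleSplit_ne_nil (cs : List Char) : simpleSplit cs ≠ [] := by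
  cases cs with
  | nil => simp [simpleSplit]
  | cons c rest =>
      simp only [simpleSplit]
      split_ifs
      · simp
      · cases h : simpleSplit rest <;> simp

theorem consHead_consHead (a b : List Char) (l : List (List Char)) :
    consHead a (consHead b l) = consHead (a ++ b) l := by
  cases l <;> simp [consHead]

theorem splitOn_go_eq (fuel : Nat) :
    ∀ (l cur : List Char) (accl : List (List Char)), l.length < fuel →
      PySem.Chars.splitOn.go ['\n'] fuel l cur accl = accl.reverse ++ consHead cur.reverse (simpleSplit l) := by
  induction fuel with
  | zero => intro l cur accl h; omega
  | succ n ih =>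
      intro l cur accl h
      cases l with
      | nil => simp [PySem.Chars.splitOn.go, simpleSplit, consHead]
      | cons c rest =>
          simp only [PySem.Chars.splitOn.go]
          by_cases hc : c = '\n'
          · subst hc
            rw [if_pos (by simp [List.isPrefixOf])]
            simp only [List.length_cons, List.drop_succ_cons, List.length_nil, List.drop_zero]
            rw [ih rest [] (cur.reverse :: accl) (by simpa using Nat.lt_of_succ_lt_succ h)]
            have hne := simpleSplit_ne_nil rest
            cases hs : simpleSplit rest with
            | nil => exact absurd hs hne
            | cons p ps => simp [simpleSplit, consHead, hs]
          · rw [if_neg (by simp [List.isPrefixOf]; exact fun he => hc he.symm)]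
            rw [ih rest (c :: cur) accl (by simpa using Nat.lt_of_succ_lt_succ h)]
            have : simpleSplit (c :: rest) = consHead [c] (simpleSplit rest) := by
              have hne := simpleSplit_ne_nil rest
              cases hs : simpleSplit rest with
              | nil => exact absurd hs hne
              | cons p ps => simp [simpleSplit, consHead, hs, hc]
            rw [this, consHead_consHead]
            simp

theorem splitOn_eq_simpleSplit (cs : List Char) :
    PySem.Chars.splitOn cs ['\n'] = simpleSplit cs := by
  unfold PySem.Chars.splitOn
  rw [splitOn_go_eq (cs.length + 1) cs [] [] (by omega)]
  have hne := simpleSplit_ne_nil cs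
  cases hs : simpleSplit cs with
  | nil => exact absurd hs hne
  | cons p ps => simp [consHead]

-- structure of simpleSplit: either no newline, or first line peeled off
theorem simpleSplit_cases (cs : List Char) :
    ('\n' ∉ cs ∧ simpleSplit cs = [cs]) ∨
    (∃ p cs', '\n' ∉ p ∧ cs = p ++ '\n' :: cs' ∧ simpleSplit cs = p :: simpleSplit cs') := by
  induction cs with
  | nil => left; exact ⟨by simp, rfl⟩
  | cons c rest ih =>
      by_cases hc : c = '\n'
      · subst hc
        right
        exact ⟨[], rest, by simp, by simp, by simp [simpleSplit]⟩
      · rcases ih with ⟨hnl, hs⟩ | ⟨p, cs', hnp, hcs, hs⟩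
        · left
          refine ⟨by simp [hnl]; exact fun he => hc he.symm, ?_⟩
          simp [simpleSplit, hc, hs]
        · right
          refine ⟨c :: p, cs', by simp [hnp]; exact fun he => hc he.symm, by simp [hcs], ?_⟩
          simp only [simpleSplit, if_neg hc, hs]

theorem prefix_append_newline {pat p cs' : List Char} (hpat : '\n' ∉ pat) :
    pat <+: p ++ '\n' :: cs' ↔ pat <+: p := by
  constructor
  · intro h
    induction p generalizing pat with
    | nil =>
        cases pat with
        | nil => simp
        | cons a t =>
            rw [List.nil_append, List.cons_prefix_cons] at h
            exact absurd (by simp [h.1]) hpat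
    | cons b bs ih =>
        cases pat with
        | nil => simp
        | cons a t =>
            rw [List.cons_append, List.cons_prefix_cons] at h
            rw [List.cons_prefix_cons]
            exact ⟨h.1, ih (by simp at hpat ⊢; exact hpat.2) h.2⟩
  · intro h
    exact h.trans (List.prefix_append _ _)

theorem infix_append_newline {pat p cs' : List Char} (hnp : '\n' ∉ p) :
    ('\n' :: pat) <:+: (p ++ '\n' :: cs') ↔ pat <+: cs' ∨ ('\n' :: pat) <:+: cs' := by
  induction p with
  | nil =>
      rw [List.nil_append, List.infix_cons_iff, List.cons_prefix_cons]
      simp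
  | cons b bs ih =>
      have hb : b ≠ '\n' := by simp at hnp; exact fun he => (hnp.1 he.symm).elim
      rw [List.cons_append, List.infix_cons_iff]
      constructor
      · rintro (hpre | hinf)
        · rw [List.cons_prefix_cons] at hpre
          exact absurd hpre.1.symm hb
        · exact (ih (by simp at hnp; exact hnp.2)).mp hinf
      · intro h
        exact Or.inr ((ih (by simp at hnp; exact hnp.2)).mpr h)

theorem no_newline_no_infix {pat cs : List Char} (hnl : '\n' ∉ cs) :
    ¬ ('\n' :: pat) <:+: cs := by
  intro h
  exact hnl (h.subset (by simp))

-- A's loop is an 'any' over the lines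
theorem checkALoop_eq_any (lines : List (List Char)) :
    checkALoop lines = lines.any (fun l => PySem.Chars.startswith l "Solution:".toList) := by
  induction lines with
  | nil => rfl
  | cons l rest ih =>
      simp only [checkALoop, List.any_cons]
      rw [ih]
      by_cases h : PySem.Chars.startswith l "Solution:".toList = true
      · rw [if_pos h, h, Bool.true_or]
      · rw [if_neg h, Bool.not_eq_true] at *
        rw [h, Bool.false_or]

theorem any_simpleSplit (cs : List Char) :
    ((simpleSplit cs).any (fun l => PySem.Chars.startswith l "Solution:".toList) = true) ↔
    ("Solution:".toList <+: cs ∨ ('\n' :: "Solution:".toList) <:+: cs) := by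
  have hpat : '\n' ∉ "Solution:".toList := by decide
  generalize hn : cs.length = n
  induction n using Nat.strong_induction_on generalizing cs with
  | _ n ih =>
      rcases simpleSplit_cases cs with ⟨hnl, hs⟩ | ⟨p, cs', hnp, hcs, hs⟩
      · rw [hs]
        simp only [List.any_cons, List.any_nil, Bool.or_false, PySem.Chars.startswith_iff]
        constructor
        · exact Or.inl
        · rintro (h | h)
          · exact h
          · exact absurd h (no_newline_no_infix hnl)
      · rw [hs, List.any_cons]
        have hlen : cs'.length < n := by subst hn; rw [hcs]; simp; omega
        rw [Bool.or_eq_true]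
        have hih := ih cs'.length hlen cs' rfl
        simp only [hih]
        rw [PySem.Chars.startswith_iff]
        rw [hcs, prefix_append_newline hpat, infix_append_newline hnp]

theorem flags_agree (commit_msg : String) :
    checkALoop (PySem.Chars.splitOn commit_msg.toList ['\n']) =
    (PySem.Str.startswith commit_msg "Solution:" || PySem.Str.isIn "\nSolution:" commit_msg) := by
  rw [Bool.eq_iff_iff]
  rw [checkALoop_eq_any, splitOn_eq_simpleSplit, any_simpleSplit]
  rw [Bool.or_eq_true, PySem.Str.startswith_eq, PySem.Chars.startswith_iff, PySem.Str.isIn_iff_infix]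
  have : ("\nSolution:".toList : List Char) = '\n' :: "Solution:".toList := by decide
  rw [this]

-- ===== VERDICT (by name: the statement is the Claim_ definition above) =====
theorem check_solution_section_spec : Claim_equal_check_solution_section := by
  intro commit_msg _
  unfold Spec_check_solution_section check_solution_section check_solution_section_alt
  rw [flags_agree]
  cases (PySem.Str.startswith commit_msg "Solution:" || PySem.Str.isIn "\nSolution:" commit_msg) <;> simp
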